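-- pv_equiv track=rewrite | github.com/YIlyaA/LABS_python | random_projects/stairs_decoder.py | create_staircase
-- ===== SOURCE A (Python) =====
-- def create_staircase(nums):
--     step = 1
--     subsets = []
--     while len(nums) != 0:
--         if len(nums) >= step:
--             subsets.append(nums[0:step])
--             nums = nums[step:]
--             step += 1
--         else:
--             return []
--
--     return subsets
-- ===== SOURCE B (Python) =====
-- def create_staircase(nums):
--     n = len(nums)
--     k = 0
--     t = 0
--     while t < n:
--         k += 1
--         t += k
--     if t != n:
--         return []
--     res = []
--     s = 0
--     for i in range(1, k + 1):
--         res.append(nums[s:s + i])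
--         s += i
--     return res
-- ===== Notes on version B (the rewrite author's own statement) =====
-- stated objective: faster
-- what changed: B decides feasibility arithmetically up front (finds the step count k with k(k+1)/2 = len(nums) by an arithmetic loop, no list operations), then slices each chunk at its precomputed offset, instead of A's loop that re-slices and re-copies the remaining tail on every iteration.
import Mathlib
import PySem

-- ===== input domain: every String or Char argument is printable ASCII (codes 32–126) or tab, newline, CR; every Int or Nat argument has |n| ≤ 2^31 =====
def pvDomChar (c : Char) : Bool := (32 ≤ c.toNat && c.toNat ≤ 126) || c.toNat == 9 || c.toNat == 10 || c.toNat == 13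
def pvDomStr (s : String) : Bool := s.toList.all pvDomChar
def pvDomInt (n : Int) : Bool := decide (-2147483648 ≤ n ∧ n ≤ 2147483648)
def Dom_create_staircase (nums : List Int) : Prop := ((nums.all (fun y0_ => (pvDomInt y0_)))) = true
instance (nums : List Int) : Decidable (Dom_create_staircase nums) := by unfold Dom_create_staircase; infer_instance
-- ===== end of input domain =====

-- B replaces A's loop (which re-slices and copies the remaining tail every iteration) by an
-- up-front arithmetic triangular-number check plus slicing at precomputed offsets (objective: faster).


-- ===== PORT A =====
-- A's while-loop; fuel = initial length + 1 always suffices (step starts at 1 and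
-- each iteration drops at least one element).
def goA (fuel : Nat) (step : Nat) (nums : List Int) (subsets : List (List Int)) : List (List Int) :=
  match fuel with
  | 0 => subsets
  | fuel + 1 =>
    if nums.length ≠ 0 then
      if step ≤ nums.length then
        goA fuel (step + 1) (PySem.List.slice nums (some (step : Int)) none)
          (subsets ++ [PySem.List.slice nums (some 0) (some (step : Int))])
      else []
    else subsets

def create_staircase (nums : List Int) : List (List Int) :=
  goA (nums.length + 1) 1 nums []

-- ===== PORT B =====
-- while t < n: k += 1; t += k
def findK (k t n : Nat) : Nat × Nat :=
  if t < n then findK (k + 1) (t + (k + 1)) n else (k, t)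
termination_by n - t
decreasing_by omega

-- for i in range(1, k+1): res.append(nums[s:s+i]); s += i
def buildB (nums : List Int) (k : Nat) (s i : Nat) (res : List (List Int)) : List (List Int) :=
  if i ≤ k then
    buildB nums k (s + i) (i + 1) (res ++ [PySem.List.slice nums (some (s : Int)) (some ((s : Int) + (i : Int)))])
  else res
termination_by k + 1 - i

def create_staircase_alt (nums : List Int) : List (List Int) :=
  let n := nums.length
  let kt := findK 0 0 n
  if kt.2 ≠ n then [] else buildB nums kt.1 0 1 []

-- ===== PRECONDITION & SPEC =====
def Spec_create_staircase (nums : List Int) (out : List (List Int)) : Prop := out = create_staircase_alt nums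
instance (nums : List Int) (out : List (List Int)) : Decidable (Spec_create_staircase nums out) := by unfold Spec_create_staircase; infer_instance

-- ===== CLAIM (what is proved, stated in full; the proofs are below) =====
def Claim_equal_create_staircase : Prop := ∀ (nums : List Int), Dom_create_staircase nums → Spec_create_staircase nums (create_staircase nums)

-- ===== LEMMAS AND PROOFS =====

-- Reference staircase splitter: some chunks on success, none when the length does not fit.
def F (step : Nat) (nums : List Int) : Option (List (List Int)) :=
  if nums.length = 0 then some []
  else if 1 ≤ step ∧ step ≤ nums.length then
    (F (step + 1) (nums.drop step)).map (nums.take step :: ·)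
  else none
termination_by nums.length
decreasing_by simp_all [List.length_drop]; omega

-- Sum step + (step+1) + … + (step+k-1).
def Ssum (step k : Nat) : Nat :=
  match k with
  | 0 => 0
  | k + 1 => step + Ssum (step + 1) k

-- Chunk builder: take i, then i+1, … up to k.
def G (i k : Nat) (ys : List Int) : List (List Int) :=
  if i ≤ k then ys.take i :: G (i + 1) k (ys.drop i) else []
termination_by k + 1 - i

theorem Ssum_succ_right (step k : Nat) : Ssum step (k + 1) = Ssum step k + (step + k) := by
  induction k generalizing step with
  | zero => simp [Ssum]
  | succ k ih =>
    have h1 : Ssum step (k + 1 + 1) = step + Ssum (step + 1) (k + 1) := rfl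
    have h2 : Ssum step (k + 1) = step + Ssum (step + 1) k := rfl
    rw [h1, ih (step + 1), h2]; omega

theorem tri_mono {i j : Nat} (h : i ≤ j) : Ssum 1 i ≤ Ssum 1 j := by
  induction j with
  | zero => simp_all
  | succ j ih =>
    rcases Nat.lt_or_ge i (j + 1) with h' | h'
    · have := ih (by omega); rw [Ssum_succ_right]; omega
    · have : i = j + 1 := by omega
      simp [this]

-- A's loop computes F.
theorem goA_eq_F (fuel : Nat) : ∀ (step : Nat) (nums : List Int) (acc : List (List Int)),
    nums.length < fuel → 1 ≤ step →
    goA fuel step nums acc = (F step nums).elim [] (acc ++ ·) := by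
  induction fuel with
  | zero => intro _ _ _ h; omega
  | succ fuel ih =>
    intro step nums acc hf hs
    rw [goA]
    by_cases h0 : nums.length = 0
    · rw [F]; simp [h0]
    · by_cases hle : step ≤ nums.length
      · have hslice0 : PySem.List.slice nums (some (0 : Int)) (some (step : Int)) = nums.take step := by
          rw [PySem.List.slice_zero_start, PySem.List.slice_to_natCast]
        have hslice1 : PySem.List.slice nums (some (step : Int)) none = nums.drop step := by
          exact PySem.List.slice_from_natCast nums step
        rw [if_pos (show nums.length ≠ 0 from h0), if_pos hle, hslice0, hslice1,
          ih (step + 1) (nums.drop step) _ (by simp [List.length_drop]; omega) (by omega)]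
        conv_rhs => rw [F]
        rw [if_neg h0, if_pos ⟨hs, hle⟩]
        cases F (step + 1) (nums.drop step) <;> simp
      · rw [F]; simp [h0, hle, hs]

-- B's builder computes G.
theorem buildB_eq_G : ∀ (d i : Nat) (k s : Nat) (res : List (List Int)) (nums : List Int),
    i = k + 1 - d → i ≥ 1 →
    buildB nums k s i res = res ++ G i k (nums.drop s) := by
  intro d
  induction d with
  | zero =>
    intro i k s res nums hi _
    rw [buildB, G]
    have : ¬ i ≤ k := by omega
    simp [this]
  | succ d ih =>
    intro i k s res nums hi h1
    rw [buildB, G]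
    by_cases hik : i ≤ k
    · have hslice : PySem.List.slice nums (some (s : Int)) (some ((s : Int) + (i : Int)))
          = (nums.drop s).take i := PySem.List.slice_natCast_add nums s i
      rw [if_pos hik, if_pos hik, hslice,
        ih (i + 1) k (s + i) _ nums (by omega) (by omega)]
      simp [List.drop_drop, Nat.add_comm]
    · simp [hik]

-- F succeeds exactly on lengths of the form Ssum step k, with value G.
theorem F_some (k : Nat) : ∀ (step : Nat) (nums : List Int), 1 ≤ step →
    nums.length = Ssum step k → F step nums = some (G step (step + k - 1) nums) := by
  induction k with
  | zero =>
    intro step nums hs hlen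
    have h0 : nums.length = 0 := by simpa [Ssum] using hlen
    rw [F, G]
    simp [h0]
    omega
  | succ k ih =>
    intro step nums hs hlen
    have hlen' : nums.length = step + Ssum (step + 1) k := by simpa [Ssum] using hlen
    have h0 : nums.length ≠ 0 := by omega
    rw [F, if_neg h0, if_pos ⟨hs, by omega⟩,
      ih (step + 1) (nums.drop step) (by omega) (by simp [List.length_drop]; omega)]
    conv_rhs => rw [G]
    rw [if_pos (by omega : step ≤ step + (k + 1) - 1)]
    have h2 : step + 1 + k - 1 = step + (k + 1) - 1 := by omega
    rw [h2]
    rfl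

theorem F_none : ∀ (n : Nat) (step : Nat) (nums : List Int), nums.length = n → 1 ≤ step →
    (∀ k, nums.length ≠ Ssum step k) → F step nums = none := by
  intro n
  induction n using Nat.strong_induction_on with
  | _ n ih =>
    intro step nums hn hs hnot
    have h0 : nums.length ≠ 0 := by
      intro h; exact hnot 0 (by simpa [Ssum] using h)
    rw [F, if_neg h0]
    by_cases hle : step ≤ nums.length
    · rw [if_pos ⟨hs, hle⟩]
      have : F (step + 1) (nums.drop step) = none := by
        apply ih (nums.length - step) (by omega) (step + 1) _ (by simp [List.length_drop]) (by omega)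
        intro k hk
        apply hnot (k + 1)
        simp [Ssum]
        simp [List.length_drop] at hk
        omega
      simp [this]
    · rw [if_neg (by tauto)]

-- findK, started at (k, Ssum 1 k), stops at the first triangular number ≥ n.
theorem findK_spec : ∀ (d n k : Nat), d = n - Ssum 1 k →
    ∃ K, findK k (Ssum 1 k) n = (K, Ssum 1 K) ∧ n ≤ Ssum 1 K ∧ k ≤ K ∧
      (∀ j, k ≤ j → j < K → Ssum 1 j < n) := by
  intro d
  induction d using Nat.strong_induction_on with
  | _ d ih =>
    intro n k hd
    by_cases h : Ssum 1 k < n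
    · rw [findK, if_pos h]
      have hnext : Ssum 1 k + (k + 1) = Ssum 1 (k + 1) := by
        rw [Ssum_succ_right]; omega
      rw [hnext]
      obtain ⟨K, heq, hle, hkK, hlt⟩ := ih (n - Ssum 1 (k + 1)) (by omega) n (k + 1) rfl
      exact ⟨K, heq, hle, by omega, fun j h1 h2 => by
        rcases Nat.lt_or_ge j (k + 1) with h' | h'
        · have hjk : j = k := by omega
          rw [hjk]; exact h
        · exact hlt j h' h2⟩
    · rw [findK, if_neg h]
      exact ⟨k, rfl, by omega, le_refl k, fun j h1 h2 => by omega⟩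

-- ===== VERDICT (by name: the statement is the Claim_ definition above) =====
theorem create_staircase_spec : Claim_equal_create_staircase := by
  intro nums _
  unfold Spec_create_staircase create_staircase create_staircase_alt
  have hA := goA_eq_F (nums.length + 1) 1 nums [] (by omega) (by omega)
  obtain ⟨K, heq, hle, -, hlt⟩ := findK_spec (nums.length - Ssum 1 0) nums.length 0 (by simp [Ssum])
  simp only [Ssum] at heq
  rw [hA]
  simp only [heq]
  by_cases ht : Ssum 1 K = nums.length
  · rw [F_some K 1 nums (by omega) (by omega)] at *
    rw [if_neg (by simpa using ht)]
    rw [buildB_eq_G K 1 K 0 [] nums (by omega) (by omega)]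
    simp
  · have hF : F 1 nums = none := by
      apply F_none nums.length 1 nums rfl (by omega)
      intro k hk
      rcases Nat.lt_or_ge k K with h' | h'
      · have := hlt k (by omega) h'; omega
      · have := tri_mono h'; omega
    rw [hF]
    simp [ht]
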